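-- pv_equiv track=rewrite | github.com/quasar-team/quasar | FrameworkInternals/Oracle.py | classify_xsd_restrictions
-- ===== SOURCE A (Python) =====
-- def classify_xsd_restrictions(xsd_restrictions):
--     """xsd_restrictions should be a list of tuples in which first element is XSD restriction
--        type (pattern, minInclusive, ...) and the 2nd element is the XSD restriction value
--
--        Returns None if the classification can't be done (e.g. mixed types)"""
--
--     if len(xsd_restrictions) < 1:
--         return None
--     RESTRICTIONS = {
--         'bounds' : ('minInclusive', 'maxInclusive'),
--         'pattern' : ('pattern',),
--         'enumeration' : ('enumeration',)
--         }
--     for klass in RESTRICTIONS: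
--         if all([element[0] in RESTRICTIONS[klass] for element in xsd_restrictions]):
--             return klass
--     return None
-- ===== SOURCE B (Python) =====
-- _CLASS_OF = {
--     'minInclusive': 'bounds',
--     'maxInclusive': 'bounds',
--     'pattern': 'pattern',
--     'enumeration': 'enumeration',
-- }
--
-- def classify_xsd_restrictions(xsd_restrictions):
--     if not xsd_restrictions:
--         return None
--     klass = _CLASS_OF.get(xsd_restrictions[0][0])
--     if klass is None:
--         return None
--     for restriction in xsd_restrictions[1:]:
--         if _CLASS_OF.get(restriction[0]) != klass:
--             return None
--     return klass
-- ===== Notes on version B (the rewrite author's own statement) =====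
-- stated objective: alternative
-- what changed: Replaces A's per-class full rescans of the list with an inverted index (restriction type -> class name): B classifies the first element through the map and makes one pass checking every remaining element maps to the same class, with early exit on the first mismatch or unknown type.
import Mathlib
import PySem

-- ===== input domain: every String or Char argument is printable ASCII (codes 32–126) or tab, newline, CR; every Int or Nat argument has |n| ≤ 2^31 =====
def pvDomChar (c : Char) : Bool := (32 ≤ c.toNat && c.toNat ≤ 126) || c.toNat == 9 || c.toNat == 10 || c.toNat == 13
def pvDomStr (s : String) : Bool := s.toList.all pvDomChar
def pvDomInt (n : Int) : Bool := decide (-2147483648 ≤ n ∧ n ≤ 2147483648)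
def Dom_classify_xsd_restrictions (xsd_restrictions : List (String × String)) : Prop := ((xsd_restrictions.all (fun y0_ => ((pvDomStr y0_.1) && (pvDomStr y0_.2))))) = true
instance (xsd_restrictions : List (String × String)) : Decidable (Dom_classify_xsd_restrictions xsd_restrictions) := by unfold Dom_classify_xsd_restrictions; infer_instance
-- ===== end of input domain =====

-- B replaces A's per-class full rescans with an inverted index (restriction type -> class)
-- and a single pass comparing each element's class to the first element's (objective: alternative).

-- ===== PORT A =====
-- the 'for klass in RESTRICTIONS' loop with early return
def classifyLoopA : List (String × List String) → List (String × String) → Option String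
  | [], _ => none
  | (klass, ts) :: rest, xs =>
      if xs.all (fun element => ts.contains element.1) then some klass
      else classifyLoopA rest xs

def classify_xsd_restrictions (xsd_restrictions : List (String × String)) : Option String :=
  if xsd_restrictions.length < 1 then none
  else
    classifyLoopA
      [("bounds", ["minInclusive", "maxInclusive"]),
       ("pattern", ["pattern"]),
       ("enumeration", ["enumeration"])]
      xsd_restrictions

-- ===== PORT B =====
-- the module-level inverted index _CLASS_OF, looked up with dict.get
def classOfB (t : String) : Option String :=
  PySem.Dict.get?
    (PySem.Dict.ofList
      [("minInclusive", "bounds"), ("maxInclusive", "bounds"),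
       ("pattern", "pattern"), ("enumeration", "enumeration")]) t

-- the 'for restriction in xsd_restrictions[1:]' loop with early return
def checkRestB (klass : String) : List (String × String) → Option String
  | [] => some klass
  | restriction :: rest =>
      if classOfB restriction.1 ≠ some klass then none
      else checkRestB klass rest

def classify_xsd_restrictions_alt (xsd_restrictions : List (String × String)) : Option String :=
  match xsd_restrictions with
  | [] => none
  | first :: rest =>
      match classOfB first.1 with
      | none => none
      | some klass => checkRestB klass rest

-- ===== PRECONDITION & SPEC =====
def Spec_classify_xsd_restrictions (xsd_restrictions : List (String × String)) (out : Option String) : Prop := out = classify_xsd_restrictions_alt xsd_restrictions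
instance (xsd_restrictions : List (String × String)) (out : Option String) : Decidable (Spec_classify_xsd_restrictions xsd_restrictions out) := by unfold Spec_classify_xsd_restrictions; infer_instance

-- ===== CLAIM =====
def Claim_equal_classify_xsd_restrictions : Prop := ∀ (xsd_restrictions : List (String × String)), Dom_classify_xsd_restrictions xsd_restrictions → Spec_classify_xsd_restrictions xsd_restrictions (classify_xsd_restrictions xsd_restrictions)

-- ===== LEMMAS AND PROOFS =====

-- the inverted index as an if-chain over the four known restriction types
theorem classOfB_eq (t : String) : classOfB t =
    (if "minInclusive" = t then some "bounds"
     else if "maxInclusive" = t then some "bounds"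
     else if "pattern" = t then some "pattern"
     else if "enumeration" = t then some "enumeration"
     else none) := by
  have hd : (PySem.Dict.ofList
      [("minInclusive", "bounds"), ("maxInclusive", "bounds"),
       ("pattern", "pattern"), ("enumeration", "enumeration")] : PySem.Dict String String)
      = PySem.Dict.mk
      [("minInclusive", "bounds"), ("maxInclusive", "bounds"),
       ("pattern", "pattern"), ("enumeration", "enumeration")] := by decide
  unfold classOfB
  rw [hd]
  by_cases h1 : ("minInclusive" : String) = t <;> by_cases h2 : ("maxInclusive" : String) = t <;>
    by_cases h3 : ("pattern" : String) = t <;> by_cases h4 : ("enumeration" : String) = t <;>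
    simp_all [PySem.Dict.get?]

theorem classOfB_bounds (t : String) :
    classOfB t = some "bounds" ↔ t ∈ (["minInclusive", "maxInclusive"] : List String) := by
  rw [classOfB_eq]; split_ifs <;> subst_vars <;> simp_all [eq_comm]

theorem classOfB_pattern (t : String) :
    classOfB t = some "pattern" ↔ t ∈ (["pattern"] : List String) := by
  rw [classOfB_eq]; split_ifs <;> subst_vars <;> simp_all [eq_comm]

theorem classOfB_enumeration (t : String) :
    classOfB t = some "enumeration" ↔ t ∈ (["enumeration"] : List String) := by
  rw [classOfB_eq]; split_ifs <;> subst_vars <;> simp_all [eq_comm]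

-- B's tail check equals A's 'all elements in ts' rescan, for a class whose type set is ts
theorem checkRestB_eq (klass : String) (ts : List String)
    (h : ∀ t, (classOfB t = some klass) ↔ t ∈ ts) :
    ∀ rest : List (String × String),
      checkRestB klass rest
        = if rest.all (fun e => ts.contains e.1) then some klass else none := by
  intro rest
  induction rest with
  | nil => simp [checkRestB]
  | cons x xs ih =>
      simp only [checkRestB, List.all_cons]
      by_cases hx : classOfB x.1 = some klass
      · have hc : ts.contains x.1 = true := by simpa using (h x.1).1 hx
        rw [if_neg (by simp [hx]), ih]
        simp only [hc, Bool.true_and]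
      · have hm : x.1 ∉ ts := fun hm => hx ((h x.1).2 hm)
        have hc : ts.contains x.1 = false := by simp [hm]
        rw [if_pos (by simp [hx])]
        simp only [hc]
        simp

-- ===== VERDICT =====
theorem classify_xsd_restrictions_spec : Claim_equal_classify_xsd_restrictions := by
  intro xs _
  unfold Spec_classify_xsd_restrictions
  match xs with
  | [] => rfl
  | (t, v) :: rest =>
      unfold classify_xsd_restrictions classify_xsd_restrictions_alt
      have hB := checkRestB_eq "bounds" ["minInclusive", "maxInclusive"] classOfB_bounds rest
      have hP := checkRestB_eq "pattern" ["pattern"] classOfB_pattern rest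
      have hE := checkRestB_eq "enumeration" ["enumeration"] classOfB_enumeration rest
      have hc := classOfB_eq t
      by_cases h1 : t = "minInclusive" <;>
        by_cases h2 : t = "maxInclusive" <;>
        by_cases h3 : t = "pattern" <;>
        by_cases h4 : t = "enumeration" <;>
        subst_vars <;>
        simp only [classifyLoopA, List.all_cons,
            show (["minInclusive", "maxInclusive"] : List String).contains "minInclusive" = true from by decide,
            show (["minInclusive", "maxInclusive"] : List String).contains "maxInclusive" = true from by decide,
            show (["minInclusive", "maxInclusive"] : List String).contains "pattern" = false from by decide,
            show (["minInclusive", "maxInclusive"] : List String).contains "enumeration" = false from by decide,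
            show (["pattern"] : List String).contains "minInclusive" = false from by decide,
            show (["pattern"] : List String).contains "maxInclusive" = false from by decide,
            show (["pattern"] : List String).contains "pattern" = true from by decide,
            show (["pattern"] : List String).contains "enumeration" = false from by decide,
            show (["enumeration"] : List String).contains "minInclusive" = false from by decide,
            show (["enumeration"] : List String).contains "maxInclusive" = false from by decide,
            show (["enumeration"] : List String).contains "pattern" = false from by decide,
            show (["enumeration"] : List String).contains "enumeration" = true from by decide,
            Bool.true_and, Bool.false_and] <;>
        simp_all <;>
        rw [if_neg (fun h => h1 h.symm), if_neg (fun h => h2 h.symm),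
            if_neg (fun h => h3 h.symm), if_neg (fun h => h4 h.symm)]
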